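-- pv_equiv track=rewrite | github.com/francis-barchesky/flight-test-analyzer | analyze_iads.py | _downsample_pts
-- ===== SOURCE A (Python) =====
-- def _downsample_pts(pts, max_pts):
--     if len(pts) <= max_pts:
--         return pts
--     # Min-max downsampling: split into max_pts/2 buckets, keep both the min-value
--     # and max-value point from each bucket (in time order).  Preserves all peaks
--     # and valleys at the same output size — far superior to uniform stride for
--     # detecting deviations and spikes.
--     bucket_count = max(1, max_pts // 2)
--     step = len(pts) / bucket_count
--     out = []
--     for i in range(bucket_count):
--         lo = int(i * step)
--         hi = int((i + 1) * step)
--         bucket = pts[lo:hi]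
--         if not bucket:
--             continue
--         mn = min(bucket, key=lambda p: p[1])
--         mx = max(bucket, key=lambda p: p[1])
--         if mn[0] <= mx[0]:
--             out.append(mn)
--             if mn is not mx:
--                 out.append(mx)
--         else:
--             out.append(mx)
--             if mn is not mx:
--                 out.append(mn)
--     return out
-- ===== SOURCE B (Python) =====
-- def _flush(out, mn, mx):
--     if mn is None:
--         return
--     if mn[0] <= mx[0]:
--         out.append(mn)
--         if mn is not mx:
--             out.append(mx)
--     else:
--         out.append(mx)
--         if mn is not mx:
--             out.append(mn)
--
--
-- def _downsample_pts(pts, max_pts):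
--     if len(pts) <= max_pts:
--         return pts
--     # Single linear pass: keep the current bucket's first-occurrence min/max
--     # points and flush them when the walk crosses a bucket boundary.
--     bucket_count = max(1, max_pts // 2)
--     step = len(pts) / bucket_count
--     bounds = [int(i * step) for i in range(bucket_count + 1)]
--     out = []
--     bi = 0
--     mn = mx = None
--     for idx, p in enumerate(pts):
--         while bi < bucket_count and idx >= bounds[bi + 1]:
--             _flush(out, mn, mx)
--             mn = mx = None
--             bi += 1
--         if bi >= bucket_count:
--             break
--         if mn is None or p[1] < mn[1]:
--             mn = p
--         if mx is None or p[1] > mx[1]: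
--             mx = p
--     while bi < bucket_count:
--         _flush(out, mn, mx)
--         mn = mx = None
--         bi += 1
--     return out
-- ===== Notes on version B (the rewrite author's own statement) =====
-- stated objective: alternative
-- what changed: Replaces A's per-bucket slicing with two scans (min then max) per slice by a single linear pass over the points that tracks the current bucket's first-occurrence min/max point and flushes them at each precomputed bucket boundary.
import Mathlib
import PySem

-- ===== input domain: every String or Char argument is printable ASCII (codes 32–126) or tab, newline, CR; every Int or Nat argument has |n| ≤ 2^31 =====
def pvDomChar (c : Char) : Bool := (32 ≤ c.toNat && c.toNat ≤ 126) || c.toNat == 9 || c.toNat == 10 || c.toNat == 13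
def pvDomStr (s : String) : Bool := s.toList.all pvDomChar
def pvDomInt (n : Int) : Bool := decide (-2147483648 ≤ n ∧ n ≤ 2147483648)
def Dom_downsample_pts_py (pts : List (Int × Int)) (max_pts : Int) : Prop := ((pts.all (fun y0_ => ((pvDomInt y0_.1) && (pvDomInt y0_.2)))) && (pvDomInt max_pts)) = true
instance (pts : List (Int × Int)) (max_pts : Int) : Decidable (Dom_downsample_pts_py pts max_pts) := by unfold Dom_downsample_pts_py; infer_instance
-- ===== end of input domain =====

-- B replaces A's per-bucket slicing and double scan by one linear pass that flushes
-- the running first-occurrence min/max point at each bucket boundary (objective: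
-- alternative decomposition, same cost).

-- ===== PORT A =====
-- Shared float model (both Pythons compute the SAME expression int(i * step) with
-- step = len(pts) / bucket_count in binary64): pvRhe rounds a rational to the
-- nearest integer with ties to even; pvFlt rounds a positive rational to the
-- nearest IEEE-754 double — exact for all values arising here (normal range,
-- no overflow: the inputs keep every magnitude well below 2^1024).
def pvRhe (y : ℚ) : ℤ :=
  if y - (⌊y⌋ : ℚ) < 1/2 then ⌊y⌋ else if 1/2 < y - (⌊y⌋ : ℚ) then ⌊y⌋ + 1
  else if ⌊y⌋ % 2 = 0 then ⌊y⌋ else ⌊y⌋ + 1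

def pvFlt (x : ℚ) : ℚ :=
  if x ≤ 0 then 0 else
    (pvRhe (x * (2:ℚ) ^ (52 - Int.log 2 x)) : ℚ) * (2:ℚ) ^ (-(52 - Int.log 2 x))

-- int(i * step) where step = n / b, both operations IEEE-754 double rounded
def pvBnd (n b i : ℤ) : ℤ := ⌊ pvFlt ((i:ℚ) * pvFlt ((n:ℚ) / (b:ℚ))) ⌋

-- Python min/max(bucket, key=lambda p: p[1]) keep the FIRST extremal element
def pvFMin (q : Int × Int) (l : List (Int × Int)) : Int × Int :=
  l.foldl (fun a p => if p.2 < a.2 then p else a) q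
def pvFMax (q : Int × Int) (l : List (Int × Int)) : Int × Int :=
  l.foldl (fun a p => if a.2 < p.2 then p else a) q

-- loop body of A's `for i in range(bucket_count)`
-- `mn is not mx` ⟺ mn.2 ≠ mx.2 : tuples at distinct positions are distinct
-- objects, and equal extremal values force mn and mx both to be the bucket's head
def pvBodyA (pts : List (Int × Int)) (bc : Int) (out : List (Int × Int)) (i : Int) : List (Int × Int) :=
  -- lo = int(i*step), hi = int((i+1)*step), bucket = pts[lo:hi]; mn/mx written inline
  match PySem.List.slice pts (some (pvBnd pts.length bc i)) (some (pvBnd pts.length bc (i + 1))) with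
  | [] => out
  | q :: qs =>
    if (pvFMin q qs).1 ≤ (pvFMax q qs).1 then
      (out ++ [pvFMin q qs]) ++ (if (pvFMin q qs).2 = (pvFMax q qs).2 then [] else [pvFMax q qs])
    else
      (out ++ [pvFMax q qs]) ++ (if (pvFMin q qs).2 = (pvFMax q qs).2 then [] else [pvFMin q qs])

def downsample_pts_py (pts : List (Int × Int)) (max_pts : Int) : List (Int × Int) :=
  if (pts.length : Int) ≤ max_pts then pts
  else
    let bc := max 1 (PySem.Int.floordiv max_pts 2)
    (PySem.List.pyRange 0 bc 1).foldl (pvBodyA pts bc) []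

-- ===== PORT B =====
-- _flush(out, mn, mx); `mn is not mx` ⟺ mn.2 ≠ mx.2 (they are the same object
-- iff neither strict update ever fired, i.e. iff their values are equal)
def pvFlush (out : List (Int × Int)) (mn mx : Option (Int × Int)) : List (Int × Int) :=
  match mn, mx with
  | some a, some b =>
    if a.1 ≤ b.1 then (out ++ [a]) ++ (if a.2 = b.2 then [] else [b])
    else (out ++ [b]) ++ (if a.2 = b.2 then [] else [a])
  | _, _ => out

-- `while bi < bucket_count and idx >= bounds[bi + 1]: flush; reset; bi += 1`
def pvAdvance (bounds : List Int) (bc : Int) (idx : Int)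
    (st : List (Int × Int) × Option (Int × Int) × Option (Int × Int)) (bi : Int) :
    (List (Int × Int) × Option (Int × Int) × Option (Int × Int)) × Int :=
  if h : bi < bc ∧ PySem.List.pyGetD bounds (bi + 1) 0 ≤ idx then
    pvAdvance bounds bc idx (pvFlush st.1 st.2.1 st.2.2, none, none) (bi + 1)
  else (st, bi)
termination_by (bc - bi).toNat
decreasing_by omega

-- trailing `while bi < bucket_count: flush; reset; bi += 1`
def pvTail (bc : Int) (out : List (Int × Int)) (bi : Int)
    (mn mx : Option (Int × Int)) : List (Int × Int) :=
  if h : bi < bc then pvTail bc (pvFlush out mn mx) (bi + 1) none none else out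
termination_by (bc - bi).toNat
decreasing_by omega

-- `if mn is None or p[1] < mn[1]: mn = p`  /  `if mx is None or p[1] > mx[1]: mx = p`
def pvUpdMin (mn : Option (Int × Int)) (p : Int × Int) : Option (Int × Int) :=
  match mn with | none => some p | some a => some (if p.2 < a.2 then p else a)
def pvUpdMax (mx : Option (Int × Int)) (p : Int × Int) : Option (Int × Int) :=
  match mx with | none => some p | some a => some (if a.2 < p.2 then p else a)

-- `for idx, p in enumerate(pts): ...` with the break and the trailing while
def pvWalk (bounds : List Int) (bc : Int) (rest : List (Int × Int)) (idx : Int)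
    (out : List (Int × Int)) (bi : Int) (mn mx : Option (Int × Int)) : List (Int × Int) :=
  match rest with
  | [] => pvTail bc out bi mn mx
  | p :: rs =>
    let s := pvAdvance bounds bc idx (out, mn, mx) bi
    if bc ≤ s.2 then s.1.1
    else pvWalk bounds bc rs (idx + 1) s.1.1 s.2 (pvUpdMin s.1.2.1 p) (pvUpdMax s.1.2.2 p)

def downsample_pts_py_alt (pts : List (Int × Int)) (max_pts : Int) : List (Int × Int) :=
  if (pts.length : Int) ≤ max_pts then pts
  else
    let bc := max 1 (PySem.Int.floordiv max_pts 2)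
    let bounds := (PySem.List.pyRange 0 (bc + 1) 1).map (fun i => pvBnd pts.length bc i)
    pvWalk bounds bc pts 0 [] 0 none none

-- ===== PRECONDITION & SPEC =====
def Spec_downsample_pts_py (pts : List (Int × Int)) (max_pts : Int) (out : List (Int × Int)) : Prop := out = downsample_pts_py_alt pts max_pts
instance (pts : List (Int × Int)) (max_pts : Int) (out : List (Int × Int)) : Decidable (Spec_downsample_pts_py pts max_pts out) := by unfold Spec_downsample_pts_py; infer_instance

-- ===== CLAIM (what is proved, stated in full; the proofs are below) =====
def Claim_equal_downsample_pts_py : Prop := ∀ (pts : List (Int × Int)) (max_pts : Int), Dom_downsample_pts_py pts max_pts → Spec_downsample_pts_py pts max_pts (downsample_pts_py pts max_pts)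

-- ===== LEMMAS AND PROOFS =====

-- rounding to nearest integer, ties to even
theorem pvRhe_ge (y : ℚ) : ⌊y⌋ ≤ pvRhe y := by
  unfold pvRhe; split_ifs <;> omega

theorem pvRhe_le (y : ℚ) : pvRhe y ≤ ⌊y⌋ + 1 := by
  unfold pvRhe; split_ifs <;> omega

theorem pvRhe_mono {u v : ℚ} (h : u ≤ v) : pvRhe u ≤ pvRhe v := by
  rcases lt_or_ge ⌊u⌋ ⌊v⌋ with hf | hf
  · have h1 := pvRhe_le u
    have h2 := pvRhe_ge v
    omega
  · have hfe : ⌊u⌋ = ⌊v⌋ := le_antisymm (Int.floor_mono h) hf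
    unfold pvRhe
    rw [hfe]
    have hfr : u - (⌊v⌋ : ℚ) ≤ v - (⌊v⌋ : ℚ) := by linarith
    split_ifs <;> first | omega | linarith

theorem pvRhe_nonneg {y : ℚ} (hy : 0 ≤ y) : 0 ≤ pvRhe y := by
  have := pvRhe_ge y
  have : (0:ℤ) ≤ ⌊y⌋ := Int.floor_nonneg.mpr hy
  omega

theorem pvFlt_nonneg (x : ℚ) : 0 ≤ pvFlt x := by
  unfold pvFlt
  split_ifs with hx
  · exact le_refl 0
  · push_cast [not_le] at hx
    have hy : (0:ℚ) ≤ x * (2:ℚ) ^ (52 - Int.log 2 x) := by positivity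
    have h1 : (0:ℤ) ≤ pvRhe (x * (2:ℚ) ^ (52 - Int.log 2 x)) := pvRhe_nonneg hy
    have h2 : (0:ℚ) ≤ (2:ℚ) ^ (-(52 - Int.log 2 x)) := by positivity
    exact mul_nonneg (by exact_mod_cast h1) h2

theorem pvFlt_zero : pvFlt 0 = 0 := by simp [pvFlt]

theorem pvFlt_pos_eq {x : ℚ} (hx : 0 < x) :
    pvFlt x = (pvRhe (x * (2:ℚ) ^ (52 - Int.log 2 x)) : ℚ) * (2:ℚ) ^ (-(52 - Int.log 2 x)) := by
  unfold pvFlt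
  rw [if_neg (by linarith)]

theorem pvFlt_le_pow {x : ℚ} (hx : 0 < x) : pvFlt x ≤ (2:ℚ) ^ (Int.log 2 x + 1) := by
  set e := Int.log 2 x with he
  have hlt : x < (2:ℚ) ^ (e + 1) := by
    have := Int.lt_zpow_succ_log_self (b := 2) (by norm_num) x
    simpa using this
  have hylt : x * (2:ℚ) ^ (52 - e) < (2:ℚ) ^ (e + 1) * (2:ℚ) ^ (52 - e) :=
    mul_lt_mul_of_pos_right hlt (by positivity)
  have hpow : (2:ℚ) ^ (e + 1) * (2:ℚ) ^ (52 - e) = (9007199254740992 : ℚ) := by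
    calc (2:ℚ) ^ (e + 1) * (2:ℚ) ^ (52 - e) = (2:ℚ) ^ (53 : ℤ) := by
          rw [← zpow_add₀ (by norm_num : (2:ℚ) ≠ 0)]; congr 1; ring
      _ = (9007199254740992 : ℚ) := by norm_num
  have h2 : ⌊x * (2:ℚ) ^ (52 - e)⌋ < (9007199254740992 : ℤ) := by
    apply Int.floor_lt.mpr
    rw [hpow] at hylt; exact_mod_cast hylt
  have h3 : (pvRhe (x * (2:ℚ) ^ (52 - e)) : ℤ) ≤ (9007199254740992 : ℤ) := by
    have h1 := pvRhe_le (x * (2:ℚ) ^ (52 - e)); omega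
  have hrhe : (pvRhe (x * (2:ℚ) ^ (52 - e)) : ℚ) ≤ (9007199254740992 : ℚ) := by
    exact_mod_cast h3
  rw [pvFlt_pos_eq hx, ← he]
  calc (pvRhe (x * (2:ℚ) ^ (52 - e)) : ℚ) * (2:ℚ) ^ (-(52 - e))
      ≤ (9007199254740992 : ℚ) * (2:ℚ) ^ (-(52 - e)) :=
        mul_le_mul_of_nonneg_right hrhe (by positivity)
    _ = (2:ℚ) ^ (53 : ℤ) * (2:ℚ) ^ (-(52 - e)) := by norm_num
    _ = (2:ℚ) ^ (e + 1) := by rw [← zpow_add₀ (by norm_num : (2:ℚ) ≠ 0)]; congr 1; ring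

theorem pow_le_pvFlt {y : ℚ} (hy : 0 < y) : (2:ℚ) ^ (Int.log 2 y) ≤ pvFlt y := by
  set e := Int.log 2 y with he
  have hle : (2:ℚ) ^ e ≤ y := by
    have := Int.zpow_log_le_self (b := 2) (R := ℚ) (by norm_num) hy
    simpa using this
  have hyge : (2:ℚ) ^ e * (2:ℚ) ^ (52 - e) ≤ y * (2:ℚ) ^ (52 - e) :=
    mul_le_mul_of_nonneg_right hle (by positivity)
  have hpow : (2:ℚ) ^ e * (2:ℚ) ^ (52 - e) = (4503599627370496 : ℚ) := by
    calc (2:ℚ) ^ e * (2:ℚ) ^ (52 - e) = (2:ℚ) ^ (52 : ℤ) := by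
          rw [← zpow_add₀ (by norm_num : (2:ℚ) ≠ 0)]; congr 1; ring
      _ = (4503599627370496 : ℚ) := by norm_num
  have hfl : (4503599627370496 : ℤ) ≤ ⌊y * (2:ℚ) ^ (52 - e)⌋ := by
    apply Int.le_floor.mpr
    rw [hpow] at hyge; exact_mod_cast hyge
  have hrhe : (4503599627370496 : ℤ) ≤ pvRhe (y * (2:ℚ) ^ (52 - e)) := by
    have := pvRhe_ge (y * (2:ℚ) ^ (52 - e)); omega
  rw [pvFlt_pos_eq hy, ← he]
  calc (2:ℚ) ^ e = (2:ℚ) ^ (52 : ℤ) * (2:ℚ) ^ (-(52 - e)) := by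
        rw [← zpow_add₀ (by norm_num : (2:ℚ) ≠ 0)]; congr 1; ring
    _ = (4503599627370496 : ℚ) * (2:ℚ) ^ (-(52 - e)) := by norm_num
    _ ≤ (pvRhe (y * (2:ℚ) ^ (52 - e)) : ℚ) * (2:ℚ) ^ (-(52 - e)) := by
        apply mul_le_mul_of_nonneg_right _ (by positivity)
        exact_mod_cast hrhe

theorem pvFlt_mono {x y : ℚ} (h : x ≤ y) : pvFlt x ≤ pvFlt y := by
  rcases le_or_gt x 0 with hx | hx
  · rw [pvFlt, if_pos hx]; exact pvFlt_nonneg y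
  · have hy : 0 < y := lt_of_lt_of_le hx h
    have hlog : Int.log 2 x ≤ Int.log 2 y := Int.log_mono_right hx h
    rcases eq_or_lt_of_le hlog with heq | hlt
    · rw [pvFlt_pos_eq hx, pvFlt_pos_eq hy, ← heq]
      apply mul_le_mul_of_nonneg_right _ (by positivity)
      have : pvRhe (x * (2:ℚ) ^ (52 - Int.log 2 x)) ≤ pvRhe (y * (2:ℚ) ^ (52 - Int.log 2 x)) :=
        pvRhe_mono (mul_le_mul_of_nonneg_right h (by positivity))
      exact_mod_cast this
    · calc pvFlt x ≤ (2:ℚ) ^ (Int.log 2 x + 1) := pvFlt_le_pow hx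
        _ ≤ (2:ℚ) ^ (Int.log 2 y) := by
            apply zpow_le_zpow_right₀ (by norm_num) (by omega)
        _ ≤ pvFlt y := pow_le_pvFlt hy

theorem pvBnd_nonneg (n b i : ℤ) : 0 ≤ pvBnd n b i := by
  exact Int.le_floor.mpr (by simpa using pvFlt_nonneg _)

theorem pvBnd_zero (n b : ℤ) : pvBnd n b 0 = 0 := by
  simp [pvBnd, pvFlt_zero]

theorem pvBnd_mono (n b : ℤ) {i j : ℤ} (h0 : 0 ≤ i) (h : i ≤ j) :
    pvBnd n b i ≤ pvBnd n b j := by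
  apply Int.floor_mono
  apply pvFlt_mono
  have : (i : ℚ) ≤ (j : ℚ) := by exact_mod_cast h
  exact mul_le_mul_of_nonneg_right this (pvFlt_nonneg _)

-- loop-shape lemmas for B
theorem pvTail_step (bc : Int) (out : List (Int × Int)) (bi : Int)
    (mn mx : Option (Int × Int)) (h : bi < bc) :
    pvTail bc out bi mn mx = pvTail bc (pvFlush out mn mx) (bi + 1) none none := by
  rw [pvTail]; rw [dif_pos h]

theorem pvTail_none (bc : Int) : ∀ (k : ℕ) (out : List (Int × Int)) (bi : Int),
    (bc - bi).toNat = k → pvTail bc out bi none none = out := by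
  intro k
  induction k with
  | zero =>
    intro out bi hk
    rw [pvTail, dif_neg (by omega)]
  | succ k ih =>
    intro out bi hk
    by_cases h : bi < bc
    · rw [pvTail_step bc out bi none none h]
      show pvTail bc out (bi + 1) none none = out
      exact ih out (bi + 1) (by omega)
    · rw [pvTail, dif_neg h]

theorem pvAdvance_stop (bounds : List Int) (bc idx : Int) st (bi : Int)
    (h : ¬ (bi < bc ∧ PySem.List.pyGetD bounds (bi + 1) 0 ≤ idx)) :
    pvAdvance bounds bc idx st bi = (st, bi) := by
  rw [pvAdvance]; rw [dif_neg h]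

theorem pvAdvance_step (bounds : List Int) (bc idx : Int) st (bi : Int)
    (h : bi < bc ∧ PySem.List.pyGetD bounds (bi + 1) 0 ≤ idx) :
    pvAdvance bounds bc idx st bi
      = pvAdvance bounds bc idx (pvFlush st.1 st.2.1 st.2.2, none, none) (bi + 1) := by
  conv_lhs => rw [pvAdvance]
  rw [dif_pos h]

theorem pvWalk_cons (bounds : List Int) (bc : Int) (p : Int × Int) (rs : List (Int × Int))
    (idx : Int) (out : List (Int × Int)) (bi : Int) (mn mx : Option (Int × Int)) :
    pvWalk bounds bc (p :: rs) idx out bi mn mx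
      = (let s := pvAdvance bounds bc idx (out, mn, mx) bi;
         if bc ≤ s.2 then s.1.1
         else pvWalk bounds bc rs (idx + 1) s.1.1 s.2 (pvUpdMin s.1.2.1 p) (pvUpdMax s.1.2.2 p)) := rfl

theorem pvWalk_skip (bounds : List Int) (bc : Int) (p : Int × Int) (rs : List (Int × Int))
    (idx : Int) (out : List (Int × Int)) (bi : Int) (mn mx : Option (Int × Int))
    (hb : bi < bc) (hge : PySem.List.pyGetD bounds (bi + 1) 0 ≤ idx) :
    pvWalk bounds bc (p :: rs) idx out bi mn mx
      = pvWalk bounds bc (p :: rs) idx (pvFlush out mn mx) (bi + 1) none none := by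
  rw [pvWalk_cons, pvWalk_cons, pvAdvance_step bounds bc idx (out, mn, mx) bi ⟨hb, hge⟩]

theorem pvWalk_stay (bounds : List Int) (bc : Int) (p : Int × Int) (rs : List (Int × Int))
    (idx : Int) (out : List (Int × Int)) (bi : Int) (mn mx : Option (Int × Int))
    (hb : bi < bc) (hlt : idx < PySem.List.pyGetD bounds (bi + 1) 0) :
    pvWalk bounds bc (p :: rs) idx out bi mn mx
      = pvWalk bounds bc rs (idx + 1) out bi (pvUpdMin mn p) (pvUpdMax mx p) := by
  rw [pvWalk_cons, pvAdvance_stop bounds bc idx (out, mn, mx) bi (by intro ⟨_, hc⟩; omega)]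
  simp only []
  rw [if_neg (by omega)]


-- proof-only helpers
def pvBounds (pts : List (Int × Int)) (bc : Int) : List Int :=
  (PySem.List.pyRange 0 (bc + 1) 1).map (fun i => pvBnd pts.length bc i)

theorem pvBounds_get (pts : List (Int × Int)) (bc : Int) {j : Int}
    (h0 : 0 ≤ j) (hj : j < bc + 1) :
    PySem.List.pyGetD (pvBounds pts bc) j 0 = pvBnd pts.length bc j := by
  unfold pvBounds
  exact PySem.List.pyGetD_map_pyRange_of_nonneg _ _ _ _ h0 hj

theorem pvWalk_done (bounds : List Int) (bc : Int) (rest : List (Int × Int))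
    (idx : Int) (out : List (Int × Int)) (bi : Int) (h : bc ≤ bi) :
    pvWalk bounds bc rest idx out bi none none = out := by
  cases rest with
  | nil =>
    show pvTail bc out bi none none = out
    rw [pvTail, dif_neg (by omega)]
  | cons p rs =>
    rw [pvWalk_cons, pvAdvance_stop bounds bc idx (out, none, none) bi (by intro ⟨h1, _⟩; omega)]
    simp only []
    rw [if_pos h]

theorem pvSliceA (pts : List (Int × Int)) (lo hi : Int) (h0 : 0 ≤ lo) (h1 : 0 ≤ hi) :
    PySem.List.slice pts (some lo) (some hi) = (pts.drop lo.toNat).take (hi.toNat - lo.toNat) :=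
  PySem.List.slice_toNat pts h0 h1

theorem pvBodyA_of_nil (pts : List (Int × Int)) (bc out : _) (i : Int)
    (h : PySem.List.slice pts (some (pvBnd pts.length bc i)) (some (pvBnd pts.length bc (i + 1))) = []) :
    pvBodyA pts bc out i = out := by
  unfold pvBodyA
  rw [h]

theorem pvBodyA_of_cons (pts : List (Int × Int)) (bc out : _) (i : Int)
    (q : Int × Int) (qs : List (Int × Int))
    (h : PySem.List.slice pts (some (pvBnd pts.length bc i)) (some (pvBnd pts.length bc (i + 1))) = q :: qs) :
    pvBodyA pts bc out i = pvFlush out (some (pvFMin q qs)) (some (pvFMax q qs)) := by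
  unfold pvBodyA pvFlush
  rw [h]

theorem pvFoldA_nil (pts : List (Int × Int)) (bc : Int) :
    ∀ (k : ℕ) (bi : Int), 0 ≤ bi → (bc - bi).toNat = k →
      (pts.length : Int) ≤ pvBnd pts.length bc bi →
      ∀ out, (PySem.List.pyRange bi bc 1).foldl (pvBodyA pts bc) out = out := by
  intro k
  induction k with
  | zero =>
    intro bi h0 hk hle out
    rw [PySem.List.pyRange_one_eq_nil (by omega)]
    rfl
  | succ k ih =>
    intro bi h0 hk hle out
    have hb : bi < bc := by omega
    rw [PySem.List.pyRange_one_cons hb]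
    rw [List.foldl_cons]
    have hnil : PySem.List.slice pts (some (pvBnd pts.length bc bi)) (some (pvBnd pts.length bc (bi + 1))) = [] := by
      rw [pvSliceA pts _ _ (pvBnd_nonneg _ _ _) (pvBnd_nonneg _ _ _)]
      rw [List.drop_eq_nil_of_le (by have := pvBnd_nonneg (pts.length : Int) bc bi; omega)]
      simp
    rw [pvBodyA_of_nil pts bc out bi hnil]
    exact ih (bi + 1) (by omega) (by omega)
      (le_trans hle (pvBnd_mono _ _ h0 (by omega))) out

theorem pvFMin_snoc (q x : Int × Int) (t : List (Int × Int)) :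
    pvFMin q (t ++ [x]) = if x.2 < (pvFMin q t).2 then x else pvFMin q t := by
  simp [pvFMin, List.foldl_append]

theorem pvFMax_snoc (q x : Int × Int) (t : List (Int × Int)) :
    pvFMax q (t ++ [x]) = if (pvFMax q t).2 < x.2 then x else pvFMax q t := by
  simp [pvFMax, List.foldl_append]

-- walking the inside of one nonempty bucket accumulates its first-occurrence
-- min/max and flushes them at the boundary
theorem pvInner (pts : List (Int × Int)) (bc bi lo hi : Int) (L S : ℕ)
    (hlo : lo = pvBnd pts.length bc bi) (hhi : hi = pvBnd pts.length bc (bi + 1))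
    (h0 : 0 ≤ bi) (hb : bi < bc)
    (hL : L = lo.toNat) (hS : S = min hi.toNat pts.length)
    (hLn : L < pts.length) (hLS : L + 1 ≤ S)
    (q : Int × Int) (hq : q = pts[L])
    (tail : List (Int × Int)) (htail : tail = (pts.drop (L + 1)).take (S - (L + 1))) :
    ∀ (m j : ℕ), j + m = S - (L + 1) →
    ∀ out,
      pvWalk (pvBounds pts bc) bc (pts.drop (L + 1 + j)) ((L : Int) + 1 + j) out bi
        (some (pvFMin q (tail.take j))) (some (pvFMax q (tail.take j)))
      = pvWalk (pvBounds pts bc) bc (pts.drop S) (S : Int)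
          (pvFlush out (some (pvFMin q tail)) (some (pvFMax q tail))) (bi + 1) none none := by
  have hhi0 : 0 ≤ hi := hhi ▸ pvBnd_nonneg _ _ _
  have hSlen : S ≤ pts.length := by omega
  have htlen : tail.length = S - (L + 1) := by
    rw [htail]; simp; omega
  intro m
  induction m with
  | zero =>
    intro j hj out
    have hjS : L + 1 + j = S := by omega
    have htake : tail.take j = tail := List.take_of_length_le (by omega)
    have hidx : (L : Int) + 1 + (j : ℕ) = (S : Int) := by push_cast; omega
    rw [htake, hjS, hidx]
    rcases hdrop : pts.drop S with _ | ⟨p, rs⟩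
    · show pvTail bc out bi _ _ = pvTail bc _ (bi + 1) none none
      rw [pvTail_step bc out bi _ _ hb]
    · have hSlt : S < pts.length := by
        by_contra hcon
        rw [List.drop_eq_nil_of_le (by omega)] at hdrop
        simp at hdrop
      have hShi : (S : Int) = hi := by omega
      exact pvWalk_skip _ _ _ _ _ _ _ _ _ hb
        (by rw [pvBounds_get pts bc (by omega) (by omega), ← hhi, ← hShi])
  | succ m ih =>
    intro j hj out
    have hjlt : L + 1 + j < S := by omega
    have hlt : L + 1 + j < pts.length := by omega
    rw [List.drop_eq_getElem_cons hlt]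
    rw [pvWalk_stay _ _ _ _ _ _ _ _ _ hb
      (by rw [pvBounds_get pts bc (by omega) (by omega), ← hhi]; push_cast; omega)]
    have hjt : j < tail.length := by omega
    have htj : tail[j] = pts[L + 1 + j] := by
      subst htail
      rw [List.getElem_take, List.getElem_drop]
    have hts : tail.take (j + 1) = tail.take j ++ [tail[j]] := by
      rw [List.take_add_one]
      congr
      rw [List.getElem?_eq_getElem hjt]
      rfl
    have hupmn : pvUpdMin (some (pvFMin q (tail.take j))) pts[L + 1 + j]
        = some (pvFMin q (tail.take (j + 1))) := by
      rw [hts, pvFMin_snoc, htj]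
      rfl
    have hupmx : pvUpdMax (some (pvFMax q (tail.take j))) pts[L + 1 + j]
        = some (pvFMax q (tail.take (j + 1))) := by
      rw [hts, pvFMax_snoc, htj]
      rfl
    rw [hupmn, hupmx]
    have harith : (L : Int) + 1 + j + 1 = (L : Int) + 1 + (j + 1 : ℕ) := by push_cast; ring
    have harith2 : L + 1 + j + 1 = L + 1 + (j + 1) := by omega
    rw [harith, harith2]
    exact ih (j + 1) (by omega) out

-- the linear pass, started at the left edge of bucket bi with fresh state,
-- computes exactly A's remaining folds
theorem pvMain (pts : List (Int × Int)) (bc : Int) :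
    ∀ (k : ℕ) (bi : Int), 0 ≤ bi → bi ≤ bc → (bc - bi).toNat = k →
    ∀ out,
      pvWalk (pvBounds pts bc) bc (pts.drop (pvBnd pts.length bc bi).toNat)
        (pvBnd pts.length bc bi) out bi none none
      = (PySem.List.pyRange bi bc 1).foldl (pvBodyA pts bc) out := by
  intro k
  induction k with
  | zero =>
    intro bi h0 hbc hk out
    rw [pvWalk_done _ _ _ _ _ _ (by omega)]
    rw [PySem.List.pyRange_one_eq_nil (by omega)]
    rfl
  | succ k ih =>
    intro bi h0 hbc hk out
    have hb : bi < bc := by omega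
    set N : Int := (pts.length : Int) with hN
    set lo : Int := pvBnd pts.length bc bi with hlo
    set hi : Int := pvBnd pts.length bc (bi + 1) with hhi
    have hlo0 : 0 ≤ lo := pvBnd_nonneg _ _ _
    have hhi0 : 0 ≤ hi := pvBnd_nonneg _ _ _
    have hmono : lo ≤ hi := pvBnd_mono _ _ h0 (by omega)
    rw [PySem.List.pyRange_one_cons hb, List.foldl_cons]
    by_cases hlN : N ≤ lo
    · -- past the end of the points: nothing left on either side
      rw [List.drop_eq_nil_of_le (by omega)]
      have h1 : pvWalk (pvBounds pts bc) bc [] lo out bi none none = out := by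
        show pvTail bc out bi none none = out
        exact pvTail_none bc (bc - bi).toNat out bi rfl
      rw [h1]
      have hnil : PySem.List.slice pts (some lo) (some hi) = [] := by
        rw [pvSliceA pts _ _ hlo0 hhi0]
        rw [List.drop_eq_nil_of_le (by omega)]
        simp
      rw [pvBodyA_of_nil pts bc out bi (by rw [← hlo, ← hhi]; exact hnil)]
      rw [pvFoldA_nil pts bc (bc - (bi + 1)).toNat (bi + 1) (by omega) rfl
        (le_trans hlN hmono) out]
    · push_neg at hlN
      set L : ℕ := lo.toNat with hLd
      have hLn : L < pts.length := by omega
      rw [List.drop_eq_getElem_cons hLn]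
      by_cases hlh : hi ≤ lo
      · -- empty bucket: skip it on both sides
        have heq : hi = lo := le_antisymm hlh hmono
        rw [pvWalk_skip _ _ _ _ _ _ _ _ _ hb
          (by rw [pvBounds_get pts bc (by omega) (by omega), ← hhi]; omega)]
        show pvWalk _ _ _ _ out (bi + 1) none none = _
        have hnil : PySem.List.slice pts (some lo) (some hi) = [] := by
          rw [pvSliceA pts _ _ hlo0 hhi0]
          have : hi.toNat - lo.toNat = 0 := by omega
          rw [this]
          exact List.take_zero
        rw [pvBodyA_of_nil pts bc out bi hnil]
        have hrw : pts[L] :: pts.drop (L + 1) = pts.drop (pvBnd pts.length bc (bi + 1)).toNat := by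
          rw [← hhi, heq, ← hLd, ← List.drop_eq_getElem_cons hLn]
        have hrw2 : lo = pvBnd pts.length bc (bi + 1) := by rw [← hhi, heq]
        rw [hrw, hrw2]
        exact ih (bi + 1) (by omega) (by omega) (by omega) out
      · push_neg at hlh
        set S : ℕ := min hi.toNat pts.length with hSd
        have hLS : L + 1 ≤ S := by omega
        set q : Int × Int := pts[L] with hqd
        set tail : List (Int × Int) := (pts.drop (L + 1)).take (S - (L + 1)) with htd
        -- consume the bucket head
        rw [pvWalk_stay _ _ _ _ _ _ _ _ _ hb
          (by rw [pvBounds_get pts bc (by omega) (by omega), ← hhi]; omega)]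
        have hidx : lo + 1 = (L : Int) + 1 + (0 : ℕ) := by push_cast; omega
        have hdrop0 : pts.drop (L + 1) = pts.drop (L + 1 + 0) := by rw [Nat.add_zero]
        have hU1 : pvUpdMin none q = some (pvFMin q (tail.take 0)) := rfl
        have hU2 : pvUpdMax none q = some (pvFMax q (tail.take 0)) := rfl
        rw [hidx, hdrop0, hU1, hU2]
        rw [pvInner pts bc bi lo hi L S hlo hhi h0 hb hLd hSd hLn hLS q hqd tail htd
          (S - (L + 1)) 0 (by omega) out]
        -- A's bucket value
        have hslice : PySem.List.slice pts (some lo) (some hi) = q :: tail := by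
          rw [pvSliceA pts _ _ hlo0 hhi0]
          rw [List.drop_eq_getElem_cons hLn]
          have h1 : hi.toNat - lo.toNat = (hi.toNat - L - 1) + 1 := by omega
          rw [h1, List.take_succ_cons]
          congr 1
          rcases le_or_gt hi N with hc | hc
          · have h2 : hi.toNat - L - 1 = S - (L + 1) := by omega
            rw [h2, htd]
          · have h6 : (pts.length : Int) < hi := hc
            rw [htd, List.take_of_length_le (by simp; omega),
              List.take_of_length_le (by simp; omega)]
        rw [pvBodyA_of_cons pts bc out bi q tail (by rw [← hlo, ← hhi]; exact hslice)]
        rcases le_or_gt hi N with hc | hc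
        · -- the bucket ends inside the list: continue with the induction hypothesis
          have h6 : hi ≤ (pts.length : Int) := hc
          have hc' : hi.toNat ≤ pts.length := by omega
          have hSi : (S : Int) = pvBnd pts.length bc (bi + 1) := by
            rw [← hhi, hSd, Nat.min_eq_left hc']
            omega
          have hSn : S = (pvBnd pts.length bc (bi + 1)).toNat := by
            rw [← hhi, hSd, Nat.min_eq_left hc']
          rw [hSi, hSn]
          exact ih (bi + 1) (by omega) (by omega) (by omega) _
        · -- the bucket is cut off by the end of the list: everything later is empty
          have h6 : (pts.length : Int) < hi := hc
          have hc' : pts.length ≤ hi.toNat := by omega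
          have hSn : S = pts.length := by rw [hSd, Nat.min_eq_right hc']
          rw [hSn]
          rw [List.drop_eq_nil_of_le (le_refl _)]
          have h7 : pvWalk (pvBounds pts bc) bc [] (pts.length : Int)
              (pvFlush out (some (pvFMin q tail)) (some (pvFMax q tail))) (bi + 1) none none
              = pvFlush out (some (pvFMin q tail)) (some (pvFMax q tail)) := by
            show pvTail bc _ (bi + 1) none none = _
            exact pvTail_none bc (bc - (bi + 1)).toNat _ (bi + 1) rfl
          rw [h7]
          rw [pvFoldA_nil pts bc (bc - (bi + 1)).toNat (bi + 1) (by omega) rfl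
            (by rw [← hhi]; exact le_of_lt h6) _]

-- ===== VERDICT (by name: the statement is the Claim_ definition above) =====
theorem downsample_pts_py_spec : Claim_equal_downsample_pts_py := by
  unfold Claim_equal_downsample_pts_py Spec_downsample_pts_py
  intro pts max_pts _dom
  unfold downsample_pts_py downsample_pts_py_alt
  by_cases hg : (pts.length : Int) ≤ max_pts
  · rw [if_pos hg, if_pos hg]
  · rw [if_neg hg, if_neg hg]
    set bc : Int := max 1 (PySem.Int.floordiv max_pts 2) with hbc
    have h1 : (1 : Int) ≤ bc := le_max_left _ _
    have := pvMain pts bc (bc - 0).toNat 0 (le_refl 0) (by omega) rfl []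
    rw [pvBnd_zero] at this
    simpa [pvBounds] using this.symm
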